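-- pv_equiv track=rewrite | github.com/matslindh/codingchallenges | knowit2016/knowit21.py | rotate_pyramid
-- ===== SOURCE A (Python) =====
-- def rotate_pyramid(pyramid):
--     next = []
--
--     for x in range(len(pyramid) - 1, -1, -1):
--         row = []
--
--         for y in range(x, len(pyramid)):
--             row.append(pyramid[y][x])
--
--         next.append(row)
--
--     return next
-- ===== SOURCE B (Python) =====
-- def rotate_pyramid(pyramid):
--     if not pyramid:
--         return []
--     last = pyramid[-1]
--     m = len(pyramid) - 1
--     prev = rotate_pyramid(pyramid[:-1])
--     return [[last[m]]] + [row + [last[m - 1 - i]] for i, row in enumerate(prev)]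
-- ===== Notes on version B (the rewrite author's own statement) =====
-- stated objective: alternative
-- what changed: A iteratively gathers each output row by scanning one source column per row; B is recursive: it peels off the last source row, rotates the remaining smaller pyramid, then prepends that row's last element as a new top row and appends its remaining elements one per previously rotated row.
import Mathlib
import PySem

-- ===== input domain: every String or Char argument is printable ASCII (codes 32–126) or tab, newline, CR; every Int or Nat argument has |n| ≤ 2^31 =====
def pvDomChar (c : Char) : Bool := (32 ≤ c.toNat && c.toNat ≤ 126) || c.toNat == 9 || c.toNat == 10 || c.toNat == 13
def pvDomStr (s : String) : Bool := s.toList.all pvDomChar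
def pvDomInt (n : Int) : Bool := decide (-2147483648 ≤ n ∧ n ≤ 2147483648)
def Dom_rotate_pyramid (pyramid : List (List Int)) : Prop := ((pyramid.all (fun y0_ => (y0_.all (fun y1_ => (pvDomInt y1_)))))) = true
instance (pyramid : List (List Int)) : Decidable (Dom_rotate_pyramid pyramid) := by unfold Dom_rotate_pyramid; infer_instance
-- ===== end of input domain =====

-- B rotates recursively: peel the last source row, rotate the rest, then prepend its last
-- element as a new top row and append one remaining element per rotated row; same O(n^2) cost.

-- ===== PORT A =====
def rotate_pyramid (pyramid : List (List Int)) : List (List Int) :=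
  (PySem.List.pyRange ((pyramid.length : Int) - 1) (-1) (-1)).foldl
    (fun next x =>
      next ++
        [(PySem.List.pyRange x (pyramid.length : Int) 1).foldl
          (fun row y => row ++ [PySem.List.pyGetD (PySem.List.pyGetD pyramid y []) x 0]) []])
    []

-- ===== PORT B =====
def rotate_pyramid_alt (pyramid : List (List Int)) : List (List Int) :=
  if h : pyramid = [] then []
  else
    let last := PySem.List.pyGetD pyramid (-1) []
    let m : Int := (pyramid.length : Int) - 1
    let prev := rotate_pyramid_alt (PySem.List.slice pyramid none (some (-1)))
    [PySem.List.pyGetD last m 0] ::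
      (PySem.List.enumerate prev 0).map (fun ir =>
        ir.2 ++ [PySem.List.pyGetD last (m - 1 - ir.1) 0])
termination_by pyramid.length
decreasing_by
  rw [PySem.List.slice_to_neg_one, List.length_dropLast]
  exact Nat.sub_lt (List.length_pos_of_ne_nil h) one_pos

-- ===== PRECONDITION & SPEC =====
-- Pre_ excludes ragged inputs where some row y (y < len) is shorter than y+1, on which A raises IndexError.
def Pre_rotate_pyramid (pyramid : List (List Int)) : Prop :=
  ∀ i, i < pyramid.length → i < (pyramid.getD i []).length
instance (pyramid : List (List Int)) : Decidable (Pre_rotate_pyramid pyramid) := by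
  unfold Pre_rotate_pyramid; infer_instance
def pvWitness_rotate_pyramid : List (List Int) := [[1], [2, 3], [4, 5, 6]]
def Spec_rotate_pyramid (pyramid : List (List Int)) (out : List (List Int)) : Prop := out = rotate_pyramid_alt pyramid
instance (pyramid : List (List Int)) (out : List (List Int)) : Decidable (Spec_rotate_pyramid pyramid out) := by unfold Spec_rotate_pyramid; infer_instance

-- ===== CLAIM (what is proved, stated in full; the proofs are below) =====
def Claim_equal_rotate_pyramid : Prop := ∀ (pyramid : List (List Int)), Dom_rotate_pyramid pyramid → Pre_rotate_pyramid pyramid → Spec_rotate_pyramid pyramid (rotate_pyramid pyramid)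

-- ===== LEMMAS AND PROOFS =====

-- the element pyramid[y][x] (both ports read it only at in-range nat positions)
def pvG (p : List (List Int)) (y x : Nat) : Int := (p.getD y []).getD x 0

-- row i of the rotated pyramid of a size-n source
def pvRow (p : List (List Int)) (n i k : Nat) : List Int :=
  (List.range (k - (n - 1 - i))).map (fun t => pvG p (n - 1 - i + t) (n - 1 - i))

lemma pvA_closed (p : List (List Int)) :
    rotate_pyramid p = (List.range p.length).map (fun i => pvRow p p.length i p.length) := by
  unfold rotate_pyramid
  rw [PySem.List.pyRange_neg_one]
  have hn : (((p.length : Int) - 1) - (-1)).toNat = p.length := by omega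
  rw [hn, List.foldl_map, PySem.List.foldl_append_singleton_eq_map]
  apply List.map_congr_left
  intro k hk
  rw [List.mem_range] at hk
  rw [PySem.List.pyRange_one]
  have h1 : ((p.length : Int) - ((p.length : Int) - 1 - (k : Int))).toNat = k + 1 := by omega
  rw [h1, List.foldl_map, PySem.List.foldl_append_singleton_eq_map]
  unfold pvRow
  have h2 : p.length - (p.length - 1 - k) = k + 1 := by omega
  rw [h2]
  apply List.map_congr_left
  intro j hj
  rw [List.mem_range] at hj
  have hx : (p.length : Int) - 1 - (k : Int) = ((p.length - 1 - k : Nat) : Int) := by omega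
  rw [hx]
  have hy : ((p.length - 1 - k : Nat) : Int) + (j : Int) = ((p.length - 1 - k + j : Nat) : Int) := by
    push_cast; ring
  rw [hy]
  simp only [PySem.List.pyGetD_natCast, pvG]

lemma pvG_append_lt (q : List (List Int)) (l : List Int) (y x : Nat) (h : y < q.length) :
    pvG (q ++ [l]) y x = pvG q y x := by
  simp [pvG, List.getD_eq_getElem?_getD, List.getElem?_append_left h]

lemma pvG_append_last (q : List (List Int)) (l : List Int) (x : Nat) :
    pvG (q ++ [l]) q.length x = l.getD x 0 := by
  simp [pvG, List.getD_eq_getElem?_getD]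

lemma pvB_closed (p : List (List Int)) :
    rotate_pyramid_alt p = (List.range p.length).map (fun i => pvRow p p.length i p.length) := by
  induction p using List.reverseRecOn with
  | nil => simp [rotate_pyramid_alt]
  | append_singleton q l ih =>
    rw [rotate_pyramid_alt, dif_neg (by simp)]
    simp only [PySem.List.pyGetD_neg_one_append_singleton, PySem.List.slice_to_neg_one,
      List.dropLast_concat, ih, List.length_append, List.length_cons, List.length_nil]
    have hc : ((q.length + (0 + 1) : Nat) : Int) - 1 = (q.length : Int) := by push_cast; ring
    rw [List.range_succ_eq_map, List.map_cons]
    congr 1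
    · unfold pvRow
      rw [show q.length + (0 + 1) - 1 - 0 = q.length by omega,
          show q.length + (0 + 1) - q.length = 1 by omega]
      simp only [List.range_one, List.map_cons, List.map_nil, Nat.add_zero]
      rw [pvG_append_last, hc, PySem.List.pyGetD_natCast]
    · apply List.ext_getElem
      · simp [PySem.List.length_enumerate]
      · intro j hj hj'
        simp only [List.getElem_map, PySem.List.getElem_enumerate, List.getElem_range,
          List.length_map, List.length_range, PySem.List.length_enumerate] at hj hj' ⊢
        have hjn : j < q.length := by
          simpa [PySem.List.length_enumerate] using hj
        have hidx : ((q.length + (0 + 1) : Nat) : Int) - 1 - 1 - (0 + (j : Int))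
            = ((q.length - 1 - j : Nat) : Int) := by omega
        rw [hidx, PySem.List.pyGetD_natCast]
        unfold pvRow
        rw [show q.length + (0 + 1) - 1 - Nat.succ j = q.length - 1 - j by omega,
            show q.length + (0 + 1) - (q.length - 1 - j) = (j + 1) + 1 by omega,
            show q.length - (q.length - 1 - j) = j + 1 by omega]
        conv_rhs => rw [List.range_succ]
        rw [List.map_append, List.map_cons, List.map_nil]
        congr 1
        · apply List.map_congr_left
          intro t ht
          rw [List.mem_range] at ht
          rw [pvG_append_lt]
          omega
        · rw [show q.length - 1 - j + (j + 1) = q.length by omega, pvG_append_last]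

-- ===== VERDICT (by name: the statement is the Claim_ definition above) =====
theorem rotate_pyramid_spec : Claim_equal_rotate_pyramid := by
  intro p _ _
  unfold Spec_rotate_pyramid
  rw [pvA_closed, pvB_closed]
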